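-- pv_equiv track=rewrite | github.com/NoName1247/Hakaton-by-Lampa | backend/db.py | _searchable_text_columns
-- ===== SOURCE A (Python) =====
-- def _searchable_text_columns(primary_columns: set[str]) -> list[str]:
--     """Колонки, по которым можно делать универсальный contains-поиск."""
--     preferred = [
--         "kfsr_name", "kcsr_name", "kvr_name", "kosgu_name",
--         "budget_name", "caption", "org_name", "dd_recipient_caption",
--         "source_file", "posting_date", "close_date",
--         "kfsr_code", "kcsr_raw", "kcsr_norm", "kvr_code", "kosgu_code",
--         "goal_code", "kvfo_code", "kvfo_name", "fund_source",
--         "reg_number", "con_number", "con_document_id",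
--     ]
--     cols = [c for c in preferred if c in primary_columns]
--     # Подхватываем и другие текстовые поля по паттернам имени.
--     for c in sorted(primary_columns):
--         if c in cols:
--             continue
--         lc = c.lower()
--         if any(k in lc for k in ("name", "caption", "code", "source", "date", "number", "document", "org")):
--             cols.append(c)
--     return cols[:30]
-- ===== SOURCE B (Python) =====
-- def _searchable_text_columns(primary_columns: set[str]) -> list[str]:
--     """Колонки, по которым можно делать универсальный contains-поиск."""
--     preferred = [
--         "kfsr_name", "kcsr_name", "kvr_name", "kosgu_name",
--         "budget_name", "caption", "org_name", "dd_recipient_caption",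
--         "source_file", "posting_date", "close_date",
--         "kfsr_code", "kcsr_raw", "kcsr_norm", "kvr_code", "kosgu_code",
--         "goal_code", "kvfo_code", "kvfo_name", "fund_source",
--         "reg_number", "con_number", "con_document_id",
--     ]
--     keywords = ("name", "caption", "code", "source", "date", "number", "document", "org")
--     rank = {c: i for i, c in enumerate(preferred)}
--     candidates = {
--         c for c in primary_columns
--         if c in rank or any(k in c.lower() for k in keywords)
--     }
--     ordered = sorted(candidates, key=lambda c: (rank.get(c, len(preferred)), c))
--     return ordered[:30]
-- ===== Notes on version B (the rewrite author's own statement) =====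
-- stated objective: alternative
-- what changed: Replaces A's two-phase scan (preferred-order filter, then a pre-sorted pass that appends pattern matches while checking membership in the growing result list) with a rank dict built once, a single set comprehension selecting candidates, and one sort under the key (rank.get(c, len(preferred)), c).
import Mathlib
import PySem

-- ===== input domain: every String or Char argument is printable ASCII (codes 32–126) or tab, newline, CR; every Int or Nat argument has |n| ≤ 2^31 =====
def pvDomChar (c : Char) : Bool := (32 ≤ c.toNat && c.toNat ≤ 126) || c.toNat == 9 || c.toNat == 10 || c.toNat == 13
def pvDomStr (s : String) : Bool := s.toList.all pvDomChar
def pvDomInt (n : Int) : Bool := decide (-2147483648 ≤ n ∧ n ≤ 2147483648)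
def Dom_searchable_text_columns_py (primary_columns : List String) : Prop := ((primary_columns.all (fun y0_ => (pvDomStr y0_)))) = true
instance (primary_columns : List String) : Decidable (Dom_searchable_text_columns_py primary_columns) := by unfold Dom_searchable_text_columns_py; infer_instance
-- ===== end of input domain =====

-- B replaces A's two-phase scan (preferred-order filter, then a pass over sorted(primary_columns)
-- appending pattern matches while checking membership in the growing result) with a rank dict,
-- one set comprehension of candidates, and a single sort under the key (rank.get(c, len), c).

-- shared data literals (the `preferred` list and the keyword tuple of the Python source)
def pvPreferred : List String :=
  ["kfsr_name", "kcsr_name", "kvr_name", "kosgu_name",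
   "budget_name", "caption", "org_name", "dd_recipient_caption",
   "source_file", "posting_date", "close_date",
   "kfsr_code", "kcsr_raw", "kcsr_norm", "kvr_code", "kosgu_code",
   "goal_code", "kvfo_code", "kvfo_name", "fund_source",
   "reg_number", "con_number", "con_document_id"]

def pvKeywords : List String :=
  ["name", "caption", "code", "source", "date", "number", "document", "org"]

-- ===== PORT A =====
def searchable_text_columns_py (primary_columns : List String) : List String :=
  -- cols = [c for c in preferred if c in primary_columns]
  let cols := pvPreferred.filter (fun c => primary_columns.contains c)
  -- for c in sorted(primary_columns): if c in cols: continue; lc = c.lower(); if any(k in lc ...): cols.append(c)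
  let cols := (PySem.List.sorted primary_columns (fun x => x)).foldl
    (fun cols c =>
      if cols.contains c then cols
      else
        let lc := PySem.Str.lower c
        if pvKeywords.any (fun k => PySem.Str.isIn k lc) then cols ++ [c] else cols)
    cols
  PySem.List.slice cols none (some 30)

-- ===== PORT B =====
-- rank = {c: i for i, c in enumerate(preferred)}  (a constant of the algorithm, hoisted)
def pvRank : PySem.Dict String Int :=
  (PySem.List.enumerate pvPreferred 0).foldl (fun d p => d.insert p.2 p.1) PySem.Dict.empty

def searchable_text_columns_py_alt (primary_columns : List String) : List String :=
  -- candidates = {c for c in primary_columns if c in rank or any(k in c.lower() for k in keywords)}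
  let candidates : PySem.Set String :=
    PySem.Set.ofList (primary_columns.filter
      (fun c => pvRank.contains c || pvKeywords.any (fun k => PySem.Str.isIn k (PySem.Str.lower c))))
  -- ordered = sorted(candidates, key=lambda c: (rank.get(c, len(preferred)), c))
  let ordered := PySem.List.sorted2 candidates
    (fun c => pvRank.getD c (pvPreferred.length : Int)) (fun c => c)
  PySem.List.slice ordered none (some 30)

-- ===== PRECONDITION & SPEC =====
def Spec_searchable_text_columns_py (primary_columns : List String) (out : List String) : Prop := out = searchable_text_columns_py_alt primary_columns
instance (primary_columns : List String) (out : List String) : Decidable (Spec_searchable_text_columns_py primary_columns out) := by unfold Spec_searchable_text_columns_py; infer_instance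

-- ===== CLAIM (what is proved, stated in full; the proofs are below) =====
def Claim_equal_searchable_text_columns_py : Prop := ∀ (primary_columns : List String), Dom_searchable_text_columns_py primary_columns → Spec_searchable_text_columns_py primary_columns (searchable_text_columns_py primary_columns)

-- ===== LEMMAS AND PROOFS =====

-- the keyword-match predicate shared by both programs
def pvMatch (c : String) : Bool := pvKeywords.any (fun k => PySem.Str.isIn k (PySem.Str.lower c))

-- phase 1 of A: the preferred columns present, in preferred order
def pvP1 (pc : List String) : List String := pvPreferred.filter (fun c => pc.contains c)

-- the extra columns A's loop appends
def pvL (pc : List String) : List String :=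
  PySem.List.dedup ((PySem.List.sorted pc (fun x => x)).filter
    (fun c => !(pvP1 pc).contains c && pvMatch c))

lemma pv_ofList_filter {α : Type} [BEq α] [LawfulBEq α] (q : α → Bool) (s : List α) :
    PySem.Set.ofList (s.filter q) = (PySem.Set.ofList s).filter q := by
  induction s with
  | nil => simp [PySem.Set.ofList_nil]
  | cons x s ih =>
    rw [List.filter_cons, PySem.Set.ofList_cons]
    simp only [PySem.Set.discard]
    by_cases hq : q x
    · rw [if_pos hq, PySem.Set.ofList_cons, ih]
      simp only [PySem.Set.discard, List.filter_cons, hq, if_pos, List.filter_filter]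
      congr 1
      exact List.filter_congr (fun y _ => by rw [Bool.and_comm])
    · rw [if_neg hq, ih, List.filter_cons]
      simp only [hq, Bool.false_eq_true, if_false, List.filter_filter]
      exact List.filter_congr (fun y _ => by
        by_cases h : y == x
        · have : y = x := LawfulBEq.eq_of_beq h
          subst this; simp [hq]
        · simp [h])

lemma pv_dedup_cons {α : Type} [BEq α] [LawfulBEq α] (x : α) (s : List α) :
    PySem.List.dedup (x :: s) = x :: PySem.List.dedup (s.filter (fun y => !(y == x))) := by
  simp only [PySem.List.dedup, PySem.Set.ofList_cons, PySem.Set.discard, pv_ofList_filter]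

lemma pv_dedup_sublist {α : Type} [BEq α] [LawfulBEq α] (s : List α) :
    (PySem.List.dedup s).Sublist s := by
  induction s with
  | nil => simp [PySem.List.dedup, PySem.Set.ofList_nil]
  | cons x s ih =>
    simp only [PySem.List.dedup, PySem.Set.ofList_cons, PySem.Set.discard]
    exact List.Sublist.cons₂ x (List.filter_sublist.trans ih)

lemma pv_rank_keys : pvRank.keys = pvPreferred := by
  rw [pvRank, PySem.Dict.keys_foldl_insert_key (PySem.List.enumerate pvPreferred 0)
    (fun p => p.2) (fun _ p => p.1) PySem.Dict.empty]
  rw [PySem.List.map_snd_enumerate]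
  decide

lemma pv_rank_contains (c : String) : pvRank.contains c = true ↔ c ∈ pvPreferred := by
  rw [PySem.Dict.contains_iff_mem_keys, pv_rank_keys]

lemma pv_rank_getD_of_not_mem {c : String} (h : c ∉ pvPreferred) :
    pvRank.getD c 23 = 23 := by
  apply PySem.Dict.getD_of_not_contains
  rw [← Bool.not_eq_true, pv_rank_contains]
  exact h

lemma pv_pref_nodup : pvPreferred.Nodup := by decide

lemma pv_pref_pairwise :
    pvPreferred.Pairwise (fun a b => pvRank.getD a 23 < pvRank.getD b 23) := by decide

lemma pv_pref_lt23 : ∀ a ∈ pvPreferred, pvRank.getD a 23 < 23 := by decide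

lemma pv_mem_L (pc : List String) (a : String) :
    a ∈ pvL pc ↔ a ∈ pc ∧ a ∉ pvP1 pc ∧ pvMatch a = true := by
  unfold pvL
  rw [PySem.List.mem_dedup, List.mem_filter, PySem.List.mem_sorted]
  simp

lemma pv_mem_P1 (pc : List String) (a : String) :
    a ∈ pvP1 pc ↔ a ∈ pvPreferred ∧ a ∈ pc := by
  unfold pvP1; rw [List.mem_filter]; simp

lemma pv_loopA_char (l : List String) (cols₀ : List String) :
    l.foldl (fun cols c =>
      if cols.contains c then cols
      else
        let lc := PySem.Str.lower c
        if pvKeywords.any (fun k => PySem.Str.isIn k lc) then cols ++ [c] else cols) cols₀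
    = cols₀ ++ PySem.List.dedup (l.filter (fun c => !cols₀.contains c && pvMatch c)) := by
  induction l generalizing cols₀ with
  | nil => simp [PySem.List.dedup, PySem.Set.ofList_nil]
  | cons x l ih =>
    rw [List.foldl_cons, List.filter_cons]
    by_cases hc : cols₀.contains x
    · rw [if_pos hc, if_neg (by rw [hc]; simp), ih cols₀]
    · have hcf : cols₀.contains x = false := by simpa using hc
      by_cases hm : pvMatch x
      · have hm' : (pvKeywords.any fun k => PySem.Str.isIn k (PySem.Str.lower x)) = true := hm
        rw [if_neg hc, if_pos hm', if_pos (by rw [hcf]; simpa using hm), ih (cols₀ ++ [x]),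
          pv_dedup_cons, List.append_assoc, List.cons_append, List.nil_append]
        congr 2
        rw [List.filter_filter]
        congr 1
        apply List.filter_congr
        intro y _
        by_cases hx : y == x
        · have : y = x := by exact eq_of_beq hx
          subst this
          simp [hm]
        · have hxf : (y == x) = false := by simpa using hx
          have hxf' : (x == y) = false := (BEq.comm).trans hxf
          have h1 : (cols₀ ++ [x]).contains y = cols₀.contains y := by
            rw [List.contains_append, List.contains_cons]
            simp [hxf]
          rw [h1, hxf]
          simp
      · have hmf : pvMatch x = false := by simpa using hm
        have hm' : (pvKeywords.any fun k => PySem.Str.isIn k (PySem.Str.lower x)) = false := hmf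
        rw [if_neg hc, if_neg (by rw [hm']; exact Bool.false_ne_true),
          if_neg (by rw [hcf, hmf]; simp), ih cols₀]

lemma pv_sorted2_eq_sorted_lex (xs : List String) (k1 : String → Int) (k2 : String → String) :
    PySem.List.sorted2 xs k1 k2 = PySem.List.sorted xs (fun c => toLex (k1 c, k2 c)) := by
  rw [PySem.List.sorted_eq_foldl_insertBy]
  simp only [PySem.List.sorted2]
  congr 1
  funext acc c
  congr 1
  funext a b
  by_cases h1 : k1 a < k1 b <;> by_cases h2 : k1 b < k1 a <;> by_cases h3 : k2 a < k2 b <;>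
    simp [Prod.Lex.toLex_lt_toLex, h1, h2, h3] <;> omega

lemma pv_B_sorted_char (pc : List String) :
    PySem.List.sorted2
      (PySem.Set.ofList (pc.filter (fun c => pvRank.contains c || pvMatch c)))
      (fun c => pvRank.getD c 23) (fun c => c)
    = pvP1 pc ++ pvL pc := by
  rw [pv_sorted2_eq_sorted_lex]
  apply PySem.List.sorted_eq_of_perm_of_pairwise_lt
  · -- permutation: same distinct elements on both sides
    have hnd1 : (pvP1 pc).Nodup := pv_pref_nodup.filter _
    have hnd2 : (pvL pc).Nodup := PySem.List.nodup_dedup _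
    have hndS := PySem.Set.nodup_ofList (pc.filter (fun c => pvRank.contains c || pvMatch c))
    have hnd : (pvP1 pc ++ pvL pc).Nodup :=
      hnd1.append hnd2 (fun a ha hb => ((pv_mem_L pc a).mp hb).2.1 ha)
    rw [List.perm_ext_iff_of_nodup hnd hndS]
    intro a
    rw [List.mem_append, pv_mem_P1, pv_mem_L, PySem.Set.mem_ofList, List.mem_filter,
      Bool.or_eq_true, pv_rank_contains, pv_mem_P1]
    tauto
  · -- strictly increasing under the lex key (rank.get(c, 23), c)
    rw [List.pairwise_append]
    refine ⟨?_, ?_, ?_⟩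
    · exact (pv_pref_pairwise.filter _).imp (fun h => Prod.Lex.toLex_lt_toLex.mpr (Or.inl h))
    · have hle : (pvL pc).Pairwise (fun a b => a ≤ b) :=
        ((PySem.List.sorted_pairwise pc (fun x => x)).filter _).sublist (pv_dedup_sublist _)
      have hne : (pvL pc).Pairwise (fun a b => a ≠ b) := PySem.List.nodup_dedup _
      have hlt : (pvL pc).Pairwise (fun a b => a < b) :=
        (hle.and hne).imp (fun h => lt_of_le_of_ne h.1 h.2)
      refine hlt.imp_of_mem (fun {a b} ha hb h => ?_)
      have h23a : pvRank.getD a 23 = 23 := by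
        have := (pv_mem_L pc a).mp ha
        exact pv_rank_getD_of_not_mem (fun hm => this.2.1 ((pv_mem_P1 pc a).mpr ⟨hm, this.1⟩))
      have h23b : pvRank.getD b 23 = 23 := by
        have := (pv_mem_L pc b).mp hb
        exact pv_rank_getD_of_not_mem (fun hm => this.2.1 ((pv_mem_P1 pc b).mpr ⟨hm, this.1⟩))
      exact Prod.Lex.toLex_lt_toLex.mpr (Or.inr ⟨by rw [h23a, h23b], h⟩)
    · intro a ha b hb
      have hlt : pvRank.getD a 23 < 23 := pv_pref_lt23 a ((pv_mem_P1 pc a).mp ha).1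
      have h23b : pvRank.getD b 23 = 23 := by
        have := (pv_mem_L pc b).mp hb
        exact pv_rank_getD_of_not_mem (fun hm => this.2.1 ((pv_mem_P1 pc b).mpr ⟨hm, this.1⟩))
      exact Prod.Lex.toLex_lt_toLex.mpr (Or.inl (by omega))

-- ===== VERDICT (by name: the statement is the Claim_ definition above) =====
theorem searchable_text_columns_py_spec : Claim_equal_searchable_text_columns_py := by
  intro pc _
  show searchable_text_columns_py pc = searchable_text_columns_py_alt pc
  unfold searchable_text_columns_py searchable_text_columns_py_alt
  simp only [pv_loopA_char]
  rw [show ((pvPreferred.length : Nat) : Int) = 23 from rfl]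
  rw [show (fun c => pvRank.contains c || pvKeywords.any fun k => PySem.Str.isIn k (PySem.Str.lower c))
        = (fun c => pvRank.contains c || pvMatch c) from rfl]
  rw [pv_B_sorted_char pc]
  rfl
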